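-- pv_equiv track=rewrite | github.com/Hosjev/Algo | Algo/Medium/starting_city.py | validStartingCityA
-- ===== SOURCE A (Python) =====
-- def validStartingCityA(distances, fuel, mpg):
--     # the O(N) time solution is to store the minumum
--     # number recorded after looping through once on fuel
--     # status. reason--there will always be a difference
--     # in fuel and fuel used (miles traveled) that exhausts
--     # our fuel number to its utmost, therefore, the min
--     # number HAS to be the starting city to get us
--     # around the array
--     min_fuel = 0
--     min_idx = 0
--     c_fuel = fuel[0] * mpg
--     for idx in range(1, len(distances)):
--         c_fuel = c_fuel - distances[idx-1]
--         if c_fuel < min_fuel: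
--             min_fuel = c_fuel
--             min_idx = idx
--         c_fuel += fuel[idx] * mpg
--
--     return min_idx
-- ===== SOURCE B (Python) =====
-- def validStartingCityA(distances, fuel, mpg):
--     # Greedy reset (Kadane-style): drive with a tank from the current candidate
--     # start; whenever the tank goes negative no city up to here can be the
--     # start, so restart at the next city with an empty tank.
--     start = 0
--     tank = 0
--     for i in range(len(distances) - 1):
--         tank += fuel[i] * mpg - distances[i]
--         if tank < 0:
--             start = i + 1
--             tank = 0
--     return start
-- ===== Notes on version B (the rewrite author's own statement) =====
-- stated objective: alternative
-- what changed: Replaces A's running-minimum bookkeeping (min_fuel/min_idx compared against every prefix value) by the classic greedy reset algorithm: keep a tank from the current candidate start and restart at the next city whenever the tank goes negative; no minimum is ever stored.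
import Mathlib
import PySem

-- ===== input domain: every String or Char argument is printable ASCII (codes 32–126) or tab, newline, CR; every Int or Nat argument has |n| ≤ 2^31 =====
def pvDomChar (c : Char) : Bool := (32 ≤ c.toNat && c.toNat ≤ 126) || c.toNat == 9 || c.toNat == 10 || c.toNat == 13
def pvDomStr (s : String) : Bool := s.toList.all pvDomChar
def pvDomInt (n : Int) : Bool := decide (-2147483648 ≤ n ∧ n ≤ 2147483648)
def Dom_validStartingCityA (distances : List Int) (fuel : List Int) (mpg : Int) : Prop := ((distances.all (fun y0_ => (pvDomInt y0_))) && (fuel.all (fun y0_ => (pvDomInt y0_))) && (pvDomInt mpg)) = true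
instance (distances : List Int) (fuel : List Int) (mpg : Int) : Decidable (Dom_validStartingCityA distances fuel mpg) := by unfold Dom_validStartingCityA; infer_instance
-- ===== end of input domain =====

-- B replaces A's stored running minimum by the greedy reset algorithm
-- (tank from the current candidate start, restart when it goes negative).

-- ===== PORT A =====
-- loop state = (min_fuel, min_idx, c_fuel)
def validStartingCityA (distances : List Int) (fuel : List Int) (mpg : Int) : Int :=
  let st := (PySem.List.pyRange 1 (distances.length : Int) 1).foldl
    (fun (st : Int × Int × Int) idx =>
      let c := st.2.2 - PySem.List.pyGetD distances (idx - 1) 0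
      let mf := if c < st.1 then c else st.1
      let mi := if c < st.1 then idx else st.2.1
      (mf, mi, c + PySem.List.pyGetD fuel idx 0 * mpg))
    (0, 0, PySem.List.pyGetD fuel 0 0 * mpg)
  st.2.1

-- ===== PORT B =====
-- loop state = (start, tank)
def validStartingCityA_alt (distances : List Int) (fuel : List Int) (mpg : Int) : Int :=
  let st := (PySem.List.pyRange 0 ((distances.length : Int) - 1) 1).foldl
    (fun (st : Int × Int) i =>
      let t := st.2 + PySem.List.pyGetD fuel i 0 * mpg - PySem.List.pyGetD distances i 0
      if t < 0 then (i + 1, 0) else (st.1, t))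
    (0, 0)
  st.1

-- ===== PRECONDITION & SPEC =====
-- Pre_: exactly where the Python A returns: A evaluates fuel[0] before the loop and
-- fuel[idx] for every idx < len(distances), so it raises IndexError iff fuel is empty
-- or shorter than distances.
def Pre_validStartingCityA (distances : List Int) (fuel : List Int) (mpg : Int) : Prop :=
  fuel ≠ [] ∧ distances.length ≤ fuel.length
instance (distances : List Int) (fuel : List Int) (mpg : Int) : Decidable (Pre_validStartingCityA distances fuel mpg) := by unfold Pre_validStartingCityA; infer_instance

def pvWitness_validStartingCityA : List Int × List Int × Int := ([3, 2, 4], [1, 5, 1], 2)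

def Spec_validStartingCityA (distances : List Int) (fuel : List Int) (mpg : Int) (out : Int) : Prop := out = validStartingCityA_alt distances fuel mpg
instance (distances : List Int) (fuel : List Int) (mpg : Int) (out : Int) : Decidable (Spec_validStartingCityA distances fuel mpg out) := by unfold Spec_validStartingCityA; infer_instance

-- ===== CLAIM (what is proved, stated in full; the proofs are below) =====
def Claim_equal_validStartingCityA : Prop := ∀ (distances : List Int) (fuel : List Int) (mpg : Int), Dom_validStartingCityA distances fuel mpg → Pre_validStartingCityA distances fuel mpg → Spec_validStartingCityA distances fuel mpg (validStartingCityA distances fuel mpg)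

-- ===== LEMMAS AND PROOFS =====

-- prefix value of the trip started at city 0: sum over j < k of fuel[j]*mpg - distances[j]
def pvPre (d f : List Int) (g : Int) : Nat → Int
  | 0 => 0
  | k + 1 => pvPre d f g k + PySem.List.pyGetD f (k : Int) 0 * g - PySem.List.pyGetD d (k : Int) 0

-- running first strict minimum (value, index) of pvPre over 0..t, baseline 0 at 0
def pvBest (p : Nat → Int) : Nat → Int × Nat
  | 0 => (0, 0)
  | t + 1 => if p (t + 1) < (pvBest p t).1 then (p (t + 1), t + 1) else pvBest p t

-- A's loop state after processing idx = 1..t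
theorem pvA_loop (d f : List Int) (g : Int) (t : Nat) :
    (PySem.List.pyRange 1 ((t : Int) + 1) 1).foldl
      (fun (st : Int × Int × Int) idx =>
        let c := st.2.2 - PySem.List.pyGetD d (idx - 1) 0
        let mf := if c < st.1 then c else st.1
        let mi := if c < st.1 then idx else st.2.1
        (mf, mi, c + PySem.List.pyGetD f idx 0 * g))
      (0, 0, PySem.List.pyGetD f 0 0 * g)
    = ((pvBest (pvPre d f g) t).1, ((pvBest (pvPre d f g) t).2 : Int),
       pvPre d f g t + PySem.List.pyGetD f (t : Int) 0 * g) := by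
  induction t with
  | zero =>
    rw [show ((0 : Nat) : Int) + 1 = 1 by norm_num,
        show PySem.List.pyRange (1 : Int) 1 1 = [] from rfl]
    simp [pvBest, pvPre]
  | succ t ih =>
    have hc : ((t + 1 : Nat) : Int) = (t : Int) + 1 := by push_cast; ring
    rw [show ((t + 1 : Nat) : Int) + 1 = ((t : Int) + 1) + 1 by rw [hc],
        PySem.List.pyRange_one_succ_right (by omega), List.foldl_append, ih]
    simp only [List.foldl_cons, List.foldl_nil]
    rw [show (t : Int) + 1 - 1 = (t : Int) by ring]
    rw [show pvPre d f g t + PySem.List.pyGetD f (t : Int) 0 * g - PySem.List.pyGetD d (t : Int) 0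
          = pvPre d f g (t + 1) from rfl]
    by_cases h : pvPre d f g (t + 1) < (pvBest (pvPre d f g) t).1
    · simp [pvBest, h, hc]
    · simp [pvBest, h, hc]

-- B's loop state after processing i = 0..t-1: the start is the index of the
-- first strict minimum so far, the tank is the current prefix minus that minimum
theorem pvB_loop (d f : List Int) (g : Int) (t : Nat) :
    (PySem.List.pyRange 0 (t : Int) 1).foldl
      (fun (st : Int × Int) i =>
        let c := st.2 + PySem.List.pyGetD f i 0 * g - PySem.List.pyGetD d i 0
        if c < 0 then (i + 1, 0) else (st.1, c))
      (0, 0)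
    = (((pvBest (pvPre d f g) t).2 : Int),
       pvPre d f g t - (pvBest (pvPre d f g) t).1) := by
  induction t with
  | zero => simp [PySem.List.pyRange_one_eq_nil, pvBest, pvPre]
  | succ t ih =>
    rw [show ((t + 1 : Nat) : Int) = (t : Int) + 1 by push_cast; ring,
        PySem.List.pyRange_one_succ_right (by positivity), List.foldl_append, ih]
    simp only [List.foldl_cons, List.foldl_nil]
    have hstep : pvPre d f g t - (pvBest (pvPre d f g) t).1
        + PySem.List.pyGetD f (t : Int) 0 * g - PySem.List.pyGetD d (t : Int) 0
        = pvPre d f g (t + 1) - (pvBest (pvPre d f g) t).1 := by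
      rw [show pvPre d f g (t + 1)
            = pvPre d f g t + PySem.List.pyGetD f (t : Int) 0 * g - PySem.List.pyGetD d (t : Int) 0
            from rfl]
      ring
    rw [hstep]
    by_cases h : pvPre d f g (t + 1) < (pvBest (pvPre d f g) t).1
    · have hlt : pvPre d f g (t + 1) - (pvBest (pvPre d f g) t).1 < 0 := by omega
      have hc : ((t + 1 : Nat) : Int) = (t : Int) + 1 := by push_cast; ring
      simp [pvBest, h, hlt, hc]
    · have : ¬ pvPre d f g (t + 1) - (pvBest (pvPre d f g) t).1 < 0 := by omega
      simp [pvBest, h, this]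

-- ===== VERDICT (by name: the statement is the Claim_ definition above) =====
theorem validStartingCityA_spec : Claim_equal_validStartingCityA := by
  intro d f g _ _
  unfold Spec_validStartingCityA validStartingCityA validStartingCityA_alt
  cases hn : d.length with
  | zero => norm_num
  | succ m =>
    rw [show ((m + 1 : Nat) : Int) = (m : Int) + 1 by push_cast; ring,
        show ((m : Int) + 1) - 1 = (m : Int) by ring,
        pvA_loop d f g m, pvB_loop d f g m]
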